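-- pv_equiv track=rewrite | github.com/haolunc/ARC-RL | reference_solutions/solutions/bbc9ae5d.py | transform
-- ===== SOURCE A (Python) =====
-- def transform(grid):
--     if not grid or not grid[0]:
--         return grid
--
--     row = grid[0]
--     L = len(row)
--     c = row[0]
--
--     k = 0
--     while k < L and row[k] != 0:
--         k += 1
--
--     H = L // 2
--     out = []
--     for i in range(H):
--         length = k + i
--         if length > L:
--             length = L
--         new_row = [c if idx < length else 0 for idx in range(L)]
--         out.append(new_row)
--     return out
-- ===== SOURCE B (Python) =====
-- def transform(grid):
--     if not grid or not grid[0]: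
--         return grid
--
--     row = grid[0]
--     L = len(row)
--     c = row[0]
--
--     k = 0
--     while k < L and row[k] != 0:
--         k += 1
--
--     buf = [c] * k + [0] * (L - k)
--     fill = k
--     out = []
--     for _ in range(L // 2):
--         out.append(buf.copy())
--         if fill < L:
--             buf[fill] = c
--             fill += 1
--     return out
-- ===== Notes on version B (the rewrite author's own statement) =====
-- stated objective: alternative
-- what changed: Instead of rebuilding every row with a full index-comparison comprehension, B keeps one running row buffer and a fill index, flips one cell per iteration (capped at L) and appends a copy each round; trades per-cell comparisons for incremental mutation plus copying, same overall cost.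
import Mathlib
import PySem

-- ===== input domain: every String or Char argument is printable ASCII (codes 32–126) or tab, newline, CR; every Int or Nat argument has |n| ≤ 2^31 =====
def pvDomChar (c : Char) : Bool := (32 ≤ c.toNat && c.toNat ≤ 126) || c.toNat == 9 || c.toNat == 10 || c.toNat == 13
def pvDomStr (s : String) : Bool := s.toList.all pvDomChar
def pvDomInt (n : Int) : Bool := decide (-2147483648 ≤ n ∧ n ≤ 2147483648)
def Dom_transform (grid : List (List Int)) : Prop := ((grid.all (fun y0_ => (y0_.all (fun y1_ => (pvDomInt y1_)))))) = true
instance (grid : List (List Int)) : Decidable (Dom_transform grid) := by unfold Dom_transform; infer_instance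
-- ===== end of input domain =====

-- B replaces the per-row index-comparison comprehension with a running row buffer
-- and a fill index, flipping one cell per row (capped at L); return values proved equal.


-- ===== PORT A =====
-- the `while k < L and row[k] != 0` loop: count of leading nonzero cells of row
def leadCount : List Int → Nat
  | [] => 0
  | x :: xs => if x ≠ 0 then leadCount xs + 1 else 0

def transform (grid : List (List Int)) : List (List Int) :=
  match grid with
  | [] => grid
  | [] :: _ => grid
  | (c :: rest) :: _ =>
      let row := c :: rest
      let L := row.length
      let k := leadCount row
      let H := L / 2
      (List.range H).map (fun i =>
        let length := k + i
        let length := if length > L then L else length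
        (List.range L).map (fun idx => if idx < length then c else (0 : Int)))

-- ===== PORT B =====
-- the `for _ in range(L // 2)` loop: append a copy of buf, then extend the filled prefix by one
def altLoop (c : Int) (L : Nat) : Nat → List Int → Nat → List (List Int)
  | 0, _, _ => []
  | n + 1, buf, fill =>
      buf :: (if fill < L then altLoop c L n (buf.set fill c) (fill + 1)
              else altLoop c L n buf fill)

def transform_alt (grid : List (List Int)) : List (List Int) :=
  match grid with
  | [] => grid
  | [] :: _ => grid
  | (c :: rest) :: _ =>
      let row := c :: rest
      let L := row.length
      let k := leadCount row
      let buf := List.replicate k c ++ List.replicate (L - k) 0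
      altLoop c L (L / 2) buf k

-- ===== PRECONDITION & SPEC =====
def Spec_transform (grid : List (List Int)) (out : List (List Int)) : Prop := out = transform_alt grid
instance (grid : List (List Int)) (out : List (List Int)) : Decidable (Spec_transform grid out) := by unfold Spec_transform; infer_instance

-- ===== CLAIM (what is proved, stated in full; the proofs are below) =====
def Claim_equal_transform : Prop := ∀ (grid : List (List Int)), Dom_transform grid → Spec_transform grid (transform grid)

-- ===== LEMMAS AND PROOFS =====

-- the row with filled prefix m
def pat (c : Int) (L m : Nat) : List Int :=
  (List.range L).map (fun idx => if idx < m then c else (0 : Int))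

theorem leadCount_le (xs : List Int) : leadCount xs ≤ xs.length := by
  induction xs with
  | nil => simp [leadCount]
  | cons x xs ih => simp only [leadCount, List.length_cons]; split <;> omega

theorem pat_buf (c : Int) (L k : Nat) (hk : k ≤ L) :
    List.replicate k c ++ List.replicate (L - k) (0 : Int) = pat c L k := by
  apply List.ext_getElem
  · simp [pat]; omega
  · intro i h1 h2
    simp only [pat, List.getElem_map, List.getElem_range]
    by_cases hik : i < k
    · rw [List.getElem_append_left (by simpa using hik)]
      simp [hik]
    · rw [List.getElem_append_right (by simpa using hik)]
      simp [hik]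

theorem pat_set (c : Int) (L fill : Nat) (_h : fill < L) :
    (pat c L fill).set fill c = pat c L (fill + 1) := by
  apply List.ext_getElem
  · simp [pat]
  · intro i h1 h2
    simp only [pat, List.length_map, List.length_range] at h1 h2 ⊢
    rw [List.getElem_set]
    simp only [List.getElem_map, List.getElem_range]
    split_ifs <;> omega

theorem altLoop_pat (c : Int) (L : Nat) (n : Nat) :
    ∀ fill, fill ≤ L →
    altLoop c L n (pat c L fill) fill
      = (List.range n).map (fun i => pat c L (min (fill + i) L)) := by
  induction n with
  | zero => intro fill _; simp [altLoop]
  | succ n ih =>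
    intro fill hfill
    rw [List.range_succ_eq_map]
    by_cases h : fill < L
    · simp only [altLoop, if_pos h, pat_set c L fill h, ih (fill + 1) h]
      simp only [List.map_cons, List.map_map]
      refine List.cons_eq_cons.mpr ⟨by congr 1; omega, ?_⟩
      apply List.map_congr_left; intro i _
      simp only [Function.comp_apply]; congr 1; omega
    · have hfl : fill = L := by omega
      simp only [altLoop, if_neg h, ih fill hfill]
      simp only [List.map_cons, List.map_map]
      refine List.cons_eq_cons.mpr ⟨by congr 1; omega, ?_⟩
      apply List.map_congr_left; intro i _
      simp only [Function.comp_apply]; congr 1; omega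

theorem transform_spec_aux : ∀ grid, transform grid = transform_alt grid := by
  intro grid
  match grid with
  | [] => rfl
  | [] :: _ => rfl
  | (c :: rest) :: tail =>
    simp only [transform, transform_alt]
    have hk : leadCount (c :: rest) ≤ (c :: rest).length := leadCount_le _
    rw [pat_buf c (c :: rest).length (leadCount (c :: rest)) hk,
        altLoop_pat c (c :: rest).length _ (leadCount (c :: rest)) hk]
    apply List.map_congr_left
    intro i _
    simp only [pat]
    apply List.map_congr_left
    intro idx _
    split_ifs <;> first | rfl | omega

-- ===== VERDICT (by name: the statement is the Claim_ definition above) =====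

theorem transform_spec : Claim_equal_transform := by
  intro grid _
  exact transform_spec_aux grid
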